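-- pv_equiv track=rewrite | github.com/SherryYao/CIS530_project | extension1.py | check_repeated_last_letter
-- ===== SOURCE A (Python) =====
-- def check_repeated_last_letter(word):
--     last_letter = word[-1]
--     count = 1
--     for idx in reversed(range(len(word) - 1)):
--         if word[idx] != last_letter:
--             break
--         else:
--             count += 1
--     return count > 2
-- ===== SOURCE B (Python) =====
-- def check_repeated_last_letter(word):
--     last = word[-1]
--     return word.endswith(last * 3)
-- ===== Notes on version B (the rewrite author's own statement) =====
-- stated objective: idiomatic
-- what changed: Replaces the reverse index loop with a running counter by a single suffix test word.endswith(last * 3), after the same word[-1] access (so the empty string still raises IndexError).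
import Mathlib
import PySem

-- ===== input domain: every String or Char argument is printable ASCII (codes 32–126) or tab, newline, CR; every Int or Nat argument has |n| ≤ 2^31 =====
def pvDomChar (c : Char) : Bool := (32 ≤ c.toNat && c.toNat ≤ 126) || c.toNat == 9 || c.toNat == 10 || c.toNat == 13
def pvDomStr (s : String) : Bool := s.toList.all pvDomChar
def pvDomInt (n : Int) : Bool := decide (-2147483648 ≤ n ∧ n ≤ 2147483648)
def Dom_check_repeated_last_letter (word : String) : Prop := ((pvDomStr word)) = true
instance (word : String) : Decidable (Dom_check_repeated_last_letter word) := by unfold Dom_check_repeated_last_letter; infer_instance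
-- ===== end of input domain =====

-- B replaces A's backward index loop with a running counter by a direct suffix
-- test (endswith last*3) after the same word[-1] access; return value only, no mutation.

-- ===== PORT A =====
-- the 'for idx in reversed(range(len(word) - 1)): … break …' loop, with the break
-- as an early return of the accumulated count
def pvLoopA (cs : List Char) (last : Char) : List Int → Int → Int
  | [], count => count
  | idx :: rest, count =>
      if PySem.List.pyGetD cs idx ' ' ≠ last then count
      else pvLoopA cs last rest (count + 1)

def check_repeated_last_letter (word : String) : Bool :=
  match PySem.List.pyGet? word.toList (-1) with
  | none => false  -- Python raises IndexError here; excluded by Pre_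
  | some last_letter =>
      let count := pvLoopA word.toList last_letter
        ((PySem.List.pyRange 0 ((word.toList.length : Int) - 1)).reverse) 1
      decide (count > 2)

-- ===== PORT B =====
def check_repeated_last_letter_alt (word : String) : Bool :=
  match PySem.List.pyGet? word.toList (-1) with
  | none => false  -- Python raises IndexError here; excluded by Pre_
  | some last => PySem.Str.endswith word (String.ofList [last, last, last])

-- ===== PRECONDITION & SPEC =====
-- A (and B) raise IndexError on the empty string; that is the only exclusion.
def Pre_check_repeated_last_letter (word : String) : Prop := word ≠ ""
instance (word : String) : Decidable (Pre_check_repeated_last_letter word) := by unfold Pre_check_repeated_last_letter; infer_instance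
def pvWitness_check_repeated_last_letter : String := "abbb"

def Spec_check_repeated_last_letter (word : String) (out : Bool) : Prop := out = check_repeated_last_letter_alt word
instance (word : String) (out : Bool) : Decidable (Spec_check_repeated_last_letter word out) := by unfold Spec_check_repeated_last_letter; infer_instance

-- ===== CLAIM (what is proved, stated in full; the proofs are below) =====
def Claim_equal_check_repeated_last_letter : Prop := ∀ (word : String), Dom_check_repeated_last_letter word → Pre_check_repeated_last_letter word → Spec_check_repeated_last_letter word (check_repeated_last_letter word)

-- ===== LEMMAS AND PROOFS =====

-- proof-side model of A's loop: scan the reversed prefix, counting the run of 'last'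
def pvRun (last : Char) : List Char → Int → Int
  | [], c => c
  | x :: xs, c => if x ≠ last then c else pvRun last xs (c + 1)

theorem pvRun_ge (last : Char) (xs : List Char) (c : Int) : c ≤ pvRun last xs c := by
  induction xs generalizing c with
  | nil => simp [pvRun]
  | cons x xs ih =>
      simp only [pvRun]
      split
      · exact le_refl c
      · exact le_trans (by omega) (ih (c + 1))

theorem pvLoopA_eq_run (cs : List Char) (last : Char) (ys : List Char)
    (h : ys <+: cs) (c : Int) :
    pvLoopA cs last ((PySem.List.pyRange 0 (ys.length : Int)).reverse) c
      = pvRun last ys.reverse c := by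
  induction ys using List.reverseRecOn generalizing c with
  | nil => simp [pvLoopA, pvRun, PySem.List.pyRange]
  | append_singleton zs y ih =>
      have hlen : ((zs ++ [y]).length : Int) = (zs.length : Int) + 1 := by
        simp
      rw [hlen, PySem.List.pyRange_one_succ_right (by positivity), List.reverse_append]
      obtain ⟨t, ht⟩ := h
      have hget : PySem.List.pyGet? cs (zs.length : Int) = some y := by
        rw [← ht, List.append_assoc, List.singleton_append]
        exact PySem.List.pyGet?_append_length zs (t) y
      have hgetD : PySem.List.pyGetD cs (zs.length : Int) ' ' = y := by
        simp [PySem.List.pyGetD, hget]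
      simp only [List.singleton_append, pvLoopA, hgetD,
        List.reverse_append, List.reverse_cons, List.reverse_nil, List.nil_append,
        pvRun]
      split
      · rfl
      · exact ih (List.IsPrefix.trans ⟨[y], rfl⟩ ⟨t, ht⟩) (c + 1)

theorem pvRun_gt_two (last : Char) (xs : List Char) :
    pvRun last xs 1 > 2 ↔ ∃ t, xs = last :: last :: t := by
  constructor
  · intro hgt
    match xs with
    | [] => simp [pvRun] at hgt
    | [x] =>
        by_cases hx : x = last <;> simp [pvRun, hx] at hgt
    | x :: y :: t =>
        by_cases hx : x = last
        · by_cases hy : y = last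
          · exact ⟨t, by rw [hx, hy]⟩
          · simp [pvRun, hx, hy] at hgt
        · simp [pvRun, hx] at hgt
  · rintro ⟨t, rfl⟩
    have := pvRun_ge last t 3
    simp only [pvRun, ne_eq, not_true_eq_false, if_false]
    have h3 : (1:Int) + 1 + 1 = 3 := by norm_num
    rw [h3]
    exact lt_of_lt_of_le (by norm_num) this

theorem check_repeated_last_letter_spec : Claim_equal_check_repeated_last_letter := by
  intro word _ hpre
  unfold Spec_check_repeated_last_letter
  unfold Pre_check_repeated_last_letter at hpre
  have hcs : word.toList ≠ [] := by
    simpa [← String.toList_eq_nil_iff] using hpre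
  set cs := word.toList with hcsdef
  have hlast : PySem.List.pyGet? cs (-1) = some (cs.getLast hcs) := by
    rw [PySem.List.pyGet?_neg_one, List.getLast?_eq_some_getLast]
  unfold check_repeated_last_letter check_repeated_last_letter_alt
  rw [← hcsdef, hlast]
  set last := cs.getLast hcs with hlastdef
  -- A's side: the loop equals a run count over the reversed dropLast
  have hlen : ((cs.length : Int) - 1) = ((cs.dropLast.length : Nat) : Int) := by
    have : 1 ≤ cs.length := List.length_pos_iff.mpr hcs
    simp [List.length_dropLast]
    omega
  have hA : pvLoopA cs last ((PySem.List.pyRange 0 ((cs.length : Int) - 1)).reverse) 1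
      = pvRun last cs.dropLast.reverse 1 := by
    rw [hlen]
    exact pvLoopA_eq_run cs last cs.dropLast (List.dropLast_prefix cs) 1
  simp only [hA]
  -- B's side: endswith [last,last,last]
  rw [PySem.Str.endswith_eq]
  have hmk : (String.ofList [last, last, last]).toList = [last, last, last] := by simp
  rw [hmk]
  have hsplit : cs.dropLast ++ [last] = cs := List.dropLast_append_getLast hcs
  have hrev : cs.reverse = last :: cs.dropLast.reverse := by
    conv_lhs => rw [← hsplit]
    simp
  have hiff : PySem.Chars.endswith cs [last, last, last]
      ↔ ∃ t, cs.dropLast.reverse = last :: last :: t := by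
    unfold PySem.Chars.endswith
    rw [List.isSuffixOf_iff_suffix, ← List.reverse_prefix, hrev]
    constructor
    · intro h
      obtain ⟨t, ht⟩ := h
      simp only [List.reverse_cons, List.reverse_nil, List.nil_append] at ht
      -- ht : [last,last,last] ++ t = last :: dropLast.reverse
      cases t' : cs.dropLast.reverse with
      | nil => rw [t'] at ht; simp at ht
      | cons a as =>
          rw [t'] at ht
          simp only [List.cons_append, List.nil_append, List.cons.injEq] at ht
          obtain ⟨-, h1, h2⟩ := ht
          cases as with
          | nil => simp at h2
          | cons b bs =>
              simp only [List.cons.injEq] at h2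
              exact ⟨bs, by rw [← h1, ← h2.1]⟩
    · rintro ⟨t, ht⟩
      rw [ht]
      exact ⟨t, by simp⟩
  by_cases h : ∃ t, cs.dropLast.reverse = last :: last :: t
  · rw [decide_eq_true ((pvRun_gt_two last _).mpr h)]
    exact (hiff.mpr h).symm
  · have h2 : PySem.Chars.endswith cs [last, last, last] = false := by
      rw [Bool.eq_false_iff]
      intro hc
      exact h (hiff.mp hc)
    rw [decide_eq_false (fun hc => h ((pvRun_gt_two last _).mp hc)), h2]
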